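-- pv_equiv track=rewrite | github.com/hsunwey/basic-sentiment-analysis | extract.py | sortedDictionary
-- ===== SOURCE A (Python) =====
-- def sortedDictionary(pure_str_list):
-- 	map_list = {}
-- 	for x in pure_str_list:
-- 		if x in map_list.keys():
-- 			map_list[x] += 1
-- 		else:
-- 			map_list[x] = 1
--
-- 	sorted_map_list ={}
-- 	for key in sorted(map_list.keys()):
-- 		sorted_map_list[key] = map_list[key]
-- 	return sorted_map_list
-- ===== SOURCE B (Python) =====
-- def sortedDictionary(pure_str_list):
--     # sort once, then one linear pass over the sorted list emitting run-lengths
--     s = sorted(pure_str_list)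
--     n = len(s)
--     out = {}
--     i = 0
--     while i < n:
--         j = i + 1
--         while j < n and s[j] == s[i]:
--             j += 1
--         out[s[i]] = j - i
--         i = j
--     return out
-- ===== Notes on version B (the rewrite author's own statement) =====
-- stated objective: alternative
-- what changed: Replaces the hash-count-then-sort-the-keys strategy by sorting the input once and doing a single run-length scan over the sorted list that emits each key with its run length.
import Mathlib
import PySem

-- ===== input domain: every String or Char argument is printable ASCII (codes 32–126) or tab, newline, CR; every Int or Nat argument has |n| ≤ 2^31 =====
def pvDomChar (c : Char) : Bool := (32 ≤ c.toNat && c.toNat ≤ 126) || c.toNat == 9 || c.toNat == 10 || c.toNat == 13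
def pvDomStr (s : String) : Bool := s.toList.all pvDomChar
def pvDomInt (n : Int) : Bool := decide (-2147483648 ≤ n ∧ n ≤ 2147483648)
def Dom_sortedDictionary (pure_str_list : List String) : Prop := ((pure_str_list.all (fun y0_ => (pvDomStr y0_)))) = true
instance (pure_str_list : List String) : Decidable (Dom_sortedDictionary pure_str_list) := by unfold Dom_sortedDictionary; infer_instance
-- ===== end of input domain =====

-- B replaces A's hash-count-then-sort-the-keys strategy by a single run-length scan over the sorted input (alternative decomposition, same result).

-- ===== PORT A =====
-- first loop: count occurrences into an insertion-ordered dict; second loop: re-insert in key-sorted order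
def sortedDictionary (pure_str_list : List String) : List (String × Int) :=
  let map_list := pure_str_list.foldl
    (fun d x => if d.contains x then d.insert x (d.getD x 0 + 1) else d.insert x 1)
    PySem.Dict.empty
  let sorted_map_list := (PySem.List.sorted map_list.keys (fun k => k) false).foldl
    (fun d key => d.insert key (map_list.getD key 0)) PySem.Dict.empty
  sorted_map_list.items

-- ===== PORT B =====
-- inner while: advance j while s[j] == x
def pyRunEnd (s : List String) (n : Nat) (x : String) (j : Nat) : Nat :=
  if h : j < n ∧ s.getD j "" = x then pyRunEnd s n x (j + 1) else j
termination_by n - j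
decreasing_by omega

-- termination fact the outer loop's recursion cites: j only moves forward
theorem le_pyRunEnd (s : List String) (n : Nat) (x : String) (j : Nat) : j ≤ pyRunEnd s n x j := by
  induction j using pyRunEnd.induct s n x with
  | case1 j h ih => rw [pyRunEnd, dif_pos h]; omega
  | case2 j h => rw [pyRunEnd, dif_neg h]

-- outer while: one iteration per run of equal elements
def pyOuter (s : List String) (n : Nat) (out : PySem.Dict String Int) (i : Nat) : PySem.Dict String Int :=
  if h : i < n then
    let x := s.getD i ""
    let j := pyRunEnd s n x (i + 1)
    pyOuter s n (out.insert x ((j : Int) - (i : Int))) j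
  else out
termination_by n - i
decreasing_by have := le_pyRunEnd s n (s.getD i "") (i + 1); omega

def sortedDictionary_alt (pure_str_list : List String) : List (String × Int) :=
  let s := PySem.List.sorted pure_str_list (fun x => x) false
  (pyOuter s s.length PySem.Dict.empty 0).items

-- ===== PRECONDITION & SPEC =====
def Spec_sortedDictionary (pure_str_list : List String) (out : List (String × Int)) : Prop := out = sortedDictionary_alt pure_str_list
instance (pure_str_list : List String) (out : List (String × Int)) : Decidable (Spec_sortedDictionary pure_str_list out) := by unfold Spec_sortedDictionary; infer_instance

-- ===== CLAIM (what is proved, stated in full; the proofs are below) =====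
def Claim_equal_sortedDictionary : Prop := ∀ (pure_str_list : List String), Dom_sortedDictionary pure_str_list → Spec_sortedDictionary pure_str_list (sortedDictionary pure_str_list)

-- ===== LEMMAS AND PROOFS =====

-- structural reading of B's loops: one whole run per step
def buildRuns : List String → PySem.Dict String Int → PySem.Dict String Int
  | [], out => out
  | x :: tail, out =>
      buildRuns (tail.dropWhile (fun y => y == x))
        (out.insert x (((tail.takeWhile (fun y => y == x)).length + 1 : Nat) : Int))
termination_by l => l.length
decreasing_by
  have := List.Sublist.length_le (List.dropWhile_sublist (l := tail) (p := (fun y => y == x)))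
  simp; omega

theorem pyRunEnd_eq (s : List String) (x : String) :
    ∀ j, j ≤ s.length →
      pyRunEnd s s.length x j = j + ((s.drop j).takeWhile (fun y => y == x)).length := by
  intro j
  induction j using pyRunEnd.induct s s.length x with
  | case1 j h ih =>
    intro _
    obtain ⟨hj, hx⟩ := h
    rw [pyRunEnd, dif_pos ⟨hj, hx⟩, List.drop_eq_getElem_cons hj, List.takeWhile_cons]
    have : (s[j] == x) = true := by
      simp [List.getD_eq_getElem?_getD, List.getElem?_eq_getElem hj] at hx
      simp [hx]
    rw [this, ih (by omega)]
    simp; omega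
  | case2 j h =>
    intro hle
    rw [pyRunEnd, dif_neg h]
    rcases Nat.lt_or_ge j s.length with hj | hj
    · have hx : ¬ s.getD j "" = x := fun hx => h ⟨hj, hx⟩
      rw [List.drop_eq_getElem_cons hj, List.takeWhile_cons]
      have : (s[j] == x) = false := by
        simp [List.getD_eq_getElem?_getD, List.getElem?_eq_getElem hj] at hx
        simp [hx]
      rw [this]; simp
    · have : s.length ≤ j := hj
      rw [List.drop_eq_nil_of_le this]; simp

theorem dropWhile_eq_drop_len_takeWhile (p : String → Bool) (l : List String) :
    l.dropWhile p = l.drop (l.takeWhile p).length := by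
  induction l with
  | nil => simp
  | cons x xs ih => by_cases h : p x <;> simp [h, ih]

theorem pyOuter_eq_buildRuns (s : List String) :
    ∀ (out : PySem.Dict String Int) (i : Nat),
      i ≤ s.length → pyOuter s s.length out i = buildRuns (s.drop i) out := by
  intro out i
  induction out, i using pyOuter.induct s s.length with
  | case1 out i h x j ih =>
    intro hle
    rw [pyOuter, dif_pos h]
    have hxval : x = s.getD i "" := rfl
    have hjval : j = pyRunEnd s s.length x (i + 1) := rfl
    have hrun : j = (i + 1) + ((s.drop (i + 1)).takeWhile (fun y => y == x)).length := by
      rw [hjval, pyRunEnd_eq s x (i + 1) (by omega)]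
    have htklen : ((s.drop (i + 1)).takeWhile (fun y => y == x)).length ≤ s.length - (i + 1) := by
      have h1 := List.Sublist.length_le
        (List.takeWhile_sublist (p := fun y => y == x) (l := s.drop (i + 1)))
      simp at h1; omega
    rw [ih (by omega)]
    have hgetd : x = s[i] := by
      rw [hxval]; simp [List.getD_eq_getElem?_getD, List.getElem?_eq_getElem h]
    have hdrop : s.drop i = x :: s.drop (i + 1) := by
      rw [hgetd]; exact List.drop_eq_getElem_cons h
    rw [hdrop, buildRuns]
    congr 1
    · rw [hrun, ← List.drop_drop,
          ← dropWhile_eq_drop_len_takeWhile (fun y => y == x) (s.drop (i + 1))]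
    · congr 1
      rw [hrun]; push_cast; omega
  | case2 out i h =>
    intro hle
    have : i = s.length := by omega
    subst this
    rw [pyOuter, dif_neg h, List.drop_length, buildRuns]

-- run-length scan of an ascending list = map over its ascending distinct keys with multiplicities
theorem buildRuns_items (K : List String) :
    ∀ (s : List String) (out : PySem.Dict String Int),
      K.Pairwise (· < ·) → s.Pairwise (· ≤ ·) → (∀ k, k ∈ K ↔ k ∈ s) →
      (∀ k ∈ s, out.contains k = false) →
      (buildRuns s out).items = out.items ++ K.map (fun k => (k, (s.count k : Int))) := by
  induction K with
  | nil =>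
    intro s out _ _ hmem _
    cases s with
    | nil => rw [buildRuns]; simp
    | cons x tail => exact absurd ((hmem x).2 (by simp)) (by simp)
  | cons k K' ih =>
    intro s out hK hs hmem hout
    cases s with
    | nil => exact absurd ((hmem k).1 (by simp)) (by simp)
    | cons x tail =>
      obtain ⟨hK1, hK2⟩ := List.pairwise_cons.mp hK
      obtain ⟨hs1, hs2⟩ := List.pairwise_cons.mp hs
      -- x = k
      have hxk : x = k := by
        have hks : k ∈ x :: tail := (hmem k).1 (by simp)
        have hxK : x ∈ k :: K' := (hmem x).2 (by simp)
        rcases List.mem_cons.mp hxK with h | h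
        · exact h
        · have hkx : k < x := hK1 x h
          rcases List.mem_cons.mp hks with h2 | h2
          · exact absurd h2.symm (ne_of_gt hkx)
          · exact absurd (hs1 k h2) (not_le.mpr hkx)
      subst hxk
      set run := tail.takeWhile (fun y => y == x) with hrun
      set rest := tail.dropWhile (fun y => y == x) with hrest
      have hsplit : run ++ rest = tail := List.takeWhile_append_dropWhile
      have hrunall : ∀ y ∈ run, y = x := by
        intro y hy
        have := List.mem_takeWhile_imp (hrun ▸ hy)
        simpa using this
      have hknotrest : x ∉ rest := by
        intro hk
        cases hrest2 : rest with
        | nil => rw [hrest2] at hk; simp at hk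
        | cons r rest' =>
          have hrk : ¬ (r == x) = true := by
            have := List.head?_dropWhile_not (fun y => y == x) tail
            rw [← hrest, hrest2] at this
            simpa using this
          have hrne : r ≠ x := by simpa using hrk
          have hrestpair : (r :: rest').Pairwise (· ≤ ·) := by
            have hsub : List.Sublist rest tail := by
              rw [hrest]; exact List.dropWhile_sublist _
            have := hs2.sublist hsub
            rwa [hrest2] at this
          rw [hrest2] at hk
          rcases List.mem_cons.mp hk with h | h
          · exact hrne h.symm
          · -- x ∈ rest', so r ≤ x; also x ≤ r since x is head of sorted list
            have h1 : r ≤ x := (List.pairwise_cons.mp hrestpair).1 x h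
            have h2 : x ≤ r := by
              have : r ∈ tail := by
                have hsub : List.Sublist rest tail := by
                  rw [hrest]; exact List.dropWhile_sublist _
                exact hsub.mem (by rw [hrest2]; simp)
              exact hs1 r this
            exact hrne (le_antisymm h1 h2)
      have hmem' : ∀ x', x' ∈ K' ↔ x' ∈ rest := by
        intro x'
        constructor
        · intro h
          have hkk' : x < x' := hK1 x' h
          have : x' ∈ x :: tail := (hmem x').1 (by simp [h])
          rcases List.mem_cons.mp this with h2 | h2
          · exact absurd h2 (ne_of_gt hkk')
          · rw [← hsplit] at h2
            rcases List.mem_append.mp h2 with h3 | h3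
            · exact absurd (hrunall x' h3) (ne_of_gt hkk')
            · exact h3
        · intro h
          have hmemtail : x' ∈ tail := by
            have hsub : List.Sublist rest tail := by
              rw [hrest]; exact List.dropWhile_sublist _
            exact hsub.mem h
          have : x' ∈ x :: K' := (hmem x').2 (by simp [hmemtail])
          rcases List.mem_cons.mp this with h2 | h2
          · exact absurd (h2 ▸ h) hknotrest
          · exact h2
      have hrestpw : rest.Pairwise (· ≤ ·) := by
        have hsub : List.Sublist rest tail := by
          rw [hrest]; exact List.dropWhile_sublist _
        exact hs2.sublist hsub
      have hcontains : ∀ x' ∈ rest, (out.insert x ((run.length + 1 : Nat) : Int)).contains x' = false := by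
        intro x' hk'
        have hne : x' ≠ x := fun h => hknotrest (h ▸ hk')
        rw [PySem.Dict.contains_insert]
        have : (x' == x) = false := by simpa using hne
        rw [this]
        have hmt : x' ∈ tail := by
          have hsub : List.Sublist rest tail := by
            rw [hrest]; exact List.dropWhile_sublist _
          exact hsub.mem hk'
        simpa using hout x' (by simp [hmt])
      rw [buildRuns, ih rest _ hK2 hrestpw hmem' hcontains]
      rw [PySem.Dict.items_insert_of_not_contains _ _ (hout x (by simp))]
      rw [List.append_assoc]
      congr 1
      simp only [List.map_cons, List.singleton_append]
      congr 1
      · -- head pair: count x (x :: tail) = run.length + 1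
        congr 1
        have hcnt : (x :: tail).count x = run.length + 1 := by
          rw [List.count_cons_self, ← hsplit, List.count_append]
          have h1 : run.count x = run.length := by
            rw [List.count_eq_length.mpr]
            intro y hy; simpa using (hrunall y hy).symm
          have h2 : rest.count x = 0 := List.count_eq_zero.mpr hknotrest
          omega
        rw [hcnt]
      · -- tail pairs: counts agree on K'
        apply List.map_congr_left
        intro x' hk'
        have hne : x' ≠ x := ne_of_gt (hK1 x' hk')
        congr 1
        have : (x :: tail).count x' = rest.count x' := by
          rw [List.count_cons_of_ne hne.symm, ← hsplit, List.count_append]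
          have : run.count x' = 0 := by
            rw [List.count_eq_zero]
            intro h; exact hne (hrunall x' h)
          omega
        rw [this]

-- A's first loop is Counter(pure_str_list)
theorem loopA_eq_counter (l : List String) :
    l.foldl (fun d x => if d.contains x then d.insert x (d.getD x 0 + 1) else d.insert x 1)
      PySem.Dict.empty = PySem.Dict.counter l := by
  rw [← PySem.Dict.foldl_insert_getD_add_one_eq_counter]
  congr 1
  funext d x
  by_cases h : d.contains x = true
  · rw [if_pos h]
  · rw [if_neg h, PySem.Dict.getD_of_not_contains _ _ (by simpa using h)]
    norm_num

-- ===== VERDICT (by name: the statement is the Claim_ definition above) =====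
theorem sortedDictionary_spec : Claim_equal_sortedDictionary := by
  intro l _
  unfold Spec_sortedDictionary sortedDictionary sortedDictionary_alt
  simp only
  rw [loopA_eq_counter, PySem.Dict.keys_counter]
  set K := PySem.List.sorted (PySem.Set.ofList l) (fun k => k) false with hK
  set s := PySem.List.sorted l (fun x => x) false with hs
  -- A side
  have hA := PySem.Dict.items_foldl_insert_fresh K (fun key => key)
      (fun key => (PySem.Dict.counter l).getD key 0) PySem.Dict.empty
      (by intro a _; exact PySem.Dict.contains_empty a)
      (by
        rw [List.map_id', hK]
        exact (PySem.List.sorted_perm (PySem.Set.ofList l) (fun k => k) false).symm.nodup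
          (PySem.Set.nodup_ofList l))
  simp only at hA
  rw [hA]
  -- B side
  rw [pyOuter_eq_buildRuns s PySem.Dict.empty 0 (by omega), List.drop_zero]
  rw [buildRuns_items K s PySem.Dict.empty
        (PySem.List.sorted_ofList_pairwise_lt l)
        (PySem.List.sorted_pairwise l (fun x => x))
        (by intro k; rw [hK, hs, PySem.List.mem_sorted, PySem.Set.mem_ofList, PySem.List.mem_sorted])
        (by intro k _; exact PySem.Dict.contains_empty k)]
  show List.map _ K = _ ++ _
  rw [show (PySem.Dict.empty : PySem.Dict String Int).items = [] from rfl, List.nil_append]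
  apply List.map_congr_left
  intro k _
  rw [PySem.Dict.getD_counter]
  congr 1
  exact_mod_cast ((PySem.List.sorted_perm l (fun x => x) false).count_eq k).symm
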